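-- pv_equiv track=rewrite | github.com/poemfish126/python_dd_code | 20220808/256.py | check
-- ===== SOURCE A (Python) =====
-- def check(onHand, supplier, demand, order):
--     m = len(onHand)
--     n = len(supplier)
--     onHnadIndex = 0
--     supplierIndex = n - order
--     for i in range(m + order):
--         if supplierIndex < n and (onHnadIndex == m or supplier[supplierIndex] <= onHand[onHnadIndex]):
--             if supplier[supplierIndex] < i // demand:
--                 return 0
--             supplierIndex += 1
--         else:
--             if onHand[onHnadIndex] < i // demand:
--                 return 0
--             onHnadIndex += 1
--     return 1
-- ===== SOURCE B (Python) =====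
-- def check(onHand, supplier, demand, order):
--     n = len(supplier)
--     xs = onHand[::-1]
--     ys = [supplier[j] for j in range(n - order, n)][::-1]
--     for k in range(len(onHand) + order):
--         if ys and (not xs or ys[-1] <= xs[-1]):
--             v = ys.pop()
--         else:
--             v = xs.pop()
--         if v < k // demand:
--             return 0
--     return 1
-- ===== Notes on version B (the rewrite author's own statement) =====
-- stated objective: alternative
-- what changed: A walks two integer indices over the original lists (including Python negative-index wraparound on supplier) in one fused loop; B first resolves the supplier window into a plain list via a wrapped-index comprehension, reverses both sequences, and consumes them destructively with pop() from the back, so no index arithmetic or negative indexing remains in the scan.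
import Mathlib
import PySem

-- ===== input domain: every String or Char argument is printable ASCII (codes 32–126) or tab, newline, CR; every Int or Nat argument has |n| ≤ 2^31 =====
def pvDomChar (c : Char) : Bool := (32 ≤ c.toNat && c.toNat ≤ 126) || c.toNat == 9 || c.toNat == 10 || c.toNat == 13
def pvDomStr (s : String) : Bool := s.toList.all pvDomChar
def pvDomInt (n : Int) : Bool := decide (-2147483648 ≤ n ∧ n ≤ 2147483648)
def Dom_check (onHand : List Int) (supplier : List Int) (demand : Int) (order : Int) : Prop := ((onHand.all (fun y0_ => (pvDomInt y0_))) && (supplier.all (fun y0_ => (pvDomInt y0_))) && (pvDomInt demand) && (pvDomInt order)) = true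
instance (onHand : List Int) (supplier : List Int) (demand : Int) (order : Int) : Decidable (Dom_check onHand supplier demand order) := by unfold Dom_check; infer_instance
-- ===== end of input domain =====

-- B replaces A's two-index walk (with Python negative-index wraparound on supplier) by
-- first materialising the supplier window as a plain list via a wrapped-index
-- comprehension, then consuming reversed copies of both sequences with pop() from the
-- back (objective: alternative decomposition, same cost; return value only, B does not
-- mutate its arguments).

-- ===== PORT A =====
-- A's single fused loop: state (i, onHnadIndex, supplierIndex), early return 0;
-- list indexing via PySem.List.pyGetD (exact inside Pre_check, where Python's indexing succeeds).
def checkLoopA (onHand supplier : List Int) (demand : Int) :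
    Nat → Int → Int → Int → Int
  | 0, _, _, _ => 1
  | fuel + 1, i, oi, si =>
    if si < (supplier.length : Int) ∧
        (oi = (onHand.length : Int) ∨
          PySem.List.pyGetD supplier si 0 ≤ PySem.List.pyGetD onHand oi 0) then
      if PySem.List.pyGetD supplier si 0 < PySem.Int.floordiv i demand then 0
      else checkLoopA onHand supplier demand fuel (i + 1) oi (si + 1)
    else
      if PySem.List.pyGetD onHand oi 0 < PySem.Int.floordiv i demand then 0
      else checkLoopA onHand supplier demand fuel (i + 1) (oi + 1) si

def check (onHand : List Int) (supplier : List Int) (demand : Int) (order : Int) : Int :=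
  checkLoopA onHand supplier demand ((onHand.length : Int) + order).toNat 0 0
    ((supplier.length : Int) - order)

-- ===== PORT B =====
-- the comprehension [supplier[j] for j in range(n - order, n)] (wrapped Python indexing,
-- exact inside Pre_check where every such index is in range)
def windowB (supplier : List Int) (order : Int) : List Int :=
  (PySem.List.pyRange ((supplier.length : Int) - order) (supplier.length : Int) 1).map
    (fun j => PySem.List.pyGetD supplier j 0)

-- B's loop over the REVERSED sequences: inspect the last element (ys[-1]/xs[-1]),
-- pop() it (dropLast), test against k // demand
def loopB (demand : Int) : Nat → Int → List Int → List Int → Int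
  | 0, _, _, _ => 1
  | fuel + 1, k, xs, ys =>
    if ys ≠ [] ∧ (xs = [] ∨ ys.getLastD 0 ≤ xs.getLastD 0) then
      if ys.getLastD 0 < PySem.Int.floordiv k demand then 0
      else loopB demand fuel (k + 1) xs ys.dropLast
    else
      if xs.getLastD 0 < PySem.Int.floordiv k demand then 0
      else loopB demand fuel (k + 1) xs.dropLast ys

def check_alt (onHand : List Int) (supplier : List Int) (demand : Int) (order : Int) : Int :=
  loopB demand ((onHand.length : Int) + order).toNat 0 onHand.reverse
    (windowB supplier order).reverse

-- ===== PRECONDITION & SPEC =====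
-- Pre_check excludes exactly the inputs where the Python A raises: demand = 0 with a
-- non-empty loop range (ZeroDivisionError), and order > 2*len(supplier), where the starting
-- supplier index is below -len(supplier) (IndexError). B raises on the same inputs.
def Pre_check (onHand : List Int) (supplier : List Int) (demand : Int) (order : Int) : Prop :=
  order ≤ 2 * (supplier.length : Int) ∧
    (demand ≠ 0 ∨ (onHand.length : Int) + order ≤ 0)
instance (onHand : List Int) (supplier : List Int) (demand : Int) (order : Int) : Decidable (Pre_check onHand supplier demand order) := by unfold Pre_check; infer_instance

def pvWitness_check : List Int × List Int × Int × Int := ([0, 1, 2], [0, 2], 2, 1)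

def Spec_check (onHand : List Int) (supplier : List Int) (demand : Int) (order : Int) (out : Int) : Prop := out = check_alt onHand supplier demand order
instance (onHand : List Int) (supplier : List Int) (demand : Int) (order : Int) (out : Int) : Decidable (Spec_check onHand supplier demand order out) := by unfold Spec_check; infer_instance

-- ===== CLAIM (what is proved, stated in full; the proofs are below) =====
def Claim_equal_check : Prop := ∀ (onHand : List Int) (supplier : List Int) (demand : Int) (order : Int), Dom_check onHand supplier demand order → Pre_check onHand supplier demand order → Spec_check onHand supplier demand order (check onHand supplier demand order)

-- ===== LEMMAS AND PROOFS =====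

-- a common FORWARD reference loop: both ports are reduced to it
def loopFwd (demand : Int) : Nat → Int → List Int → List Int → Int
  | 0, _, _, _ => 1
  | fuel + 1, k, xs, ys =>
    if ys ≠ [] ∧ (xs = [] ∨ ys.headD 0 ≤ xs.headD 0) then
      if ys.headD 0 < PySem.Int.floordiv k demand then 0
      else loopFwd demand fuel (k + 1) xs ys.tail
    else
      if xs.headD 0 < PySem.Int.floordiv k demand then 0
      else loopFwd demand fuel (k + 1) xs.tail ys

theorem getLastD_reverse (l : List Int) (d : Int) : l.reverse.getLastD d = l.headD d := by
  cases l with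
  | nil => rfl
  | cons x xs => simp [List.getLastD_eq_getLast?, List.getLast?_reverse]

theorem headD_drop (l : List Int) (t : Nat) (d : Int) :
    (l.drop t).headD d = l.getD t d := by
  rw [List.headD_eq_head?, List.head?_drop, List.getD_eq_getElem?_getD]

-- B's backwards loop on the reversed lists equals the forward loop on the originals
theorem loopB_eq_loopFwd (demand : Int) :
    ∀ (fuel : Nat) (k : Int) (xs ys : List Int),
      loopB demand fuel k xs.reverse ys.reverse = loopFwd demand fuel k xs ys := by
  intro fuel
  induction fuel with
  | zero => intro k xs ys; simp [loopB, loopFwd]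
  | succ f ih =>
    intro k xs ys
    simp only [loopB, loopFwd, getLastD_reverse, List.dropLast_reverse, ne_eq,
      List.reverse_eq_nil_iff, ih]

theorem window_length (supplier : List Int) (order : Int) :
    (windowB supplier order).length = order.toNat := by
  simp only [windowB, List.length_map, PySem.List.length_pyRange_one]
  omega

theorem window_getD (supplier : List Int) (order : Int) (t : Nat)
    (ht : (t : Int) < order) :
    (windowB supplier order).getD t 0 =
      PySem.List.pyGetD supplier ((supplier.length : Int) - order + t) 0 := by
  rw [windowB, PySem.List.pyRange_one, List.map_map]
  exact PySem.List.getD_map_range _ _ _ _ (by omega)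

-- the invariant correspondence: A's pointer loop equals the forward loop over the
-- suffixes picked out by the pointers (oi into onHand, si - (n - order) into the window)
theorem loopA_eq_loopFwd (onHand supplier : List Int) (demand order : Int) :
    ∀ (fuel : Nat) (k oi si : Int), 0 ≤ oi →
      (supplier.length : Int) - order ≤ si →
      (oi ≤ (onHand.length : Int) ∨ (supplier.length : Int) ≤ si) →
      checkLoopA onHand supplier demand fuel k oi si =
        loopFwd demand fuel k (onHand.drop oi.toNat)
          ((windowB supplier order).drop (si - ((supplier.length : Int) - order)).toNat) := by
  intro fuel
  induction fuel with
  | zero => intro k oi si _ _ _; simp [checkLoopA, loopFwd]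
  | succ f ih =>
    intro k oi si h0 h1 h2
    have lenW := window_length supplier order
    have hysne : ((windowB supplier order).drop
        (si - ((supplier.length : Int) - order)).toNat ≠ []) ↔
        si < (supplier.length : Int) := by
      rw [ne_eq, List.drop_eq_nil_iff, lenW]; omega
    have hxsne : (onHand.drop oi.toNat = []) ↔ (onHand.length : Int) ≤ oi := by
      rw [List.drop_eq_nil_iff]; omega
    have hohv : PySem.List.pyGetD onHand oi 0 = (onHand.drop oi.toNat).headD 0 := by
      rw [PySem.List.pyGetD_of_nonneg _ _ h0, headD_drop]
    have hspv : si < (supplier.length : Int) →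
        PySem.List.pyGetD supplier si 0 =
          ((windowB supplier order).drop
            (si - ((supplier.length : Int) - order)).toNat).headD 0 := by
      intro hsi
      rw [headD_drop, window_getD supplier order _ (by omega)]
      congr 1; omega
    have hcond : (si < (supplier.length : Int) ∧
        (oi = (onHand.length : Int) ∨
          PySem.List.pyGetD supplier si 0 ≤ PySem.List.pyGetD onHand oi 0)) ↔
        ((windowB supplier order).drop
            (si - ((supplier.length : Int) - order)).toNat ≠ [] ∧
          (onHand.drop oi.toNat = [] ∨
            ((windowB supplier order).drop
              (si - ((supplier.length : Int) - order)).toNat).headD 0 ≤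
            (onHand.drop oi.toNat).headD 0)) := by
      by_cases hsi : si < (supplier.length : Int)
      · have hle : oi ≤ (onHand.length : Int) := by
          rcases h2 with h | h
          · exact h
          · omega
        constructor
        · rintro ⟨-, h⟩
          refine ⟨hysne.mpr hsi, ?_⟩
          rcases h with h | h
          · exact .inl (hxsne.mpr (by omega))
          · exact .inr (by rw [← hspv hsi, ← hohv]; exact h)
        · rintro ⟨-, h⟩
          refine ⟨hsi, ?_⟩
          rcases h with h | h
          · exact .inl (by have := hxsne.mp h; omega)
          · exact .inr (by rw [hspv hsi, hohv]; exact h)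
      · constructor
        · rintro ⟨h, -⟩; exact absurd h hsi
        · rintro ⟨h, -⟩; exact absurd (hysne.mp h) hsi
    rw [checkLoopA, loopFwd]
    by_cases hC : si < (supplier.length : Int) ∧
        (oi = (onHand.length : Int) ∨
          PySem.List.pyGetD supplier si 0 ≤ PySem.List.pyGetD onHand oi 0)
    · rw [if_pos hC, if_pos (hcond.mp hC)]
      have hsi := hC.1
      rw [← hspv hsi]
      have htail : ((windowB supplier order).drop
          (si - ((supplier.length : Int) - order)).toNat).tail =
          (windowB supplier order).drop
            (si + 1 - ((supplier.length : Int) - order)).toNat := by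
        rw [List.tail_drop]; congr 1; omega
      rw [htail]
      have hrec := ih (k + 1) oi (si + 1) h0 (by omega) (by omega)
      rw [hrec]
    · rw [if_neg hC, if_neg (fun h => hC (hcond.mpr h))]
      rw [← hohv]
      have htail : (onHand.drop oi.toNat).tail = onHand.drop (oi + 1).toNat := by
        rw [List.tail_drop]; congr 1; omega
      rw [htail]
      have hdisj : oi + 1 ≤ (onHand.length : Int) ∨ (supplier.length : Int) ≤ si := by
        by_cases hsi : si < (supplier.length : Int)
        · left
          rcases h2 with h | h
          · rcases lt_or_eq_of_le h with h' | h'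
            · omega
            · exact absurd ⟨hsi, .inl h'⟩ hC
          · omega
        · right; omega
      have hrec := ih (k + 1) (oi + 1) si (by omega) h1 hdisj
      rw [hrec]

-- ===== VERDICT (by name: the statement is the Claim_ definition above) =====
theorem check_spec : Claim_equal_check := by
  intro onHand supplier demand order _ _
  unfold Spec_check check check_alt
  rw [loopB_eq_loopFwd,
    loopA_eq_loopFwd onHand supplier demand order _ 0 0
      ((supplier.length : Int) - order) le_rfl le_rfl (.inl (by positivity))]
  simp
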